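-- pv_equiv track=rewrite | github.com/ckoons/BubbleSpacetimeTheory | play/toy_403_four_color_potts.py | make_triangular_strip
-- ===== SOURCE A (Python) =====
-- def make_triangular_strip(length):
--     """Triangular lattice strip: two rows with diagonals."""
--     adj = {}
--     n = 2 * length
--     for i in range(n):
--         adj[i] = set()
--     # Horizontal edges in top row (0..length-1) and bottom row (length..2*length-1)
--     for i in range(length - 1):
--         adj[i].add(i + 1)
--         adj[i + 1].add(i)
--         adj[length + i].add(length + i + 1)
--         adj[length + i + 1].add(length + i)
--     # Vertical edges
--     for i in range(length):
--         adj[i].add(length + i)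
--         adj[length + i].add(i)
--     # Diagonal edges (top-right to bottom-left)
--     for i in range(length - 1):
--         adj[i].add(length + i + 1)
--         adj[length + i + 1].add(i)
--     return adj
-- ===== SOURCE B (Python) =====
-- def make_triangular_strip(length):
--     """Triangular lattice strip: two rows with diagonals."""
--     L = length
--     adj = {}
--     # top row: each node's neighbourhood built directly, one column at a time
--     for i in range(L):
--         s = set()
--         if i > 0:
--             s.add(i - 1)
--         if i < L - 1:
--             s.add(i + 1)
--         s.add(L + i)
--         if i < L - 1:
--             s.add(L + i + 1)
--         adj[i] = s
--     # bottom row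
--     for i in range(L):
--         s = set()
--         if i > 0:
--             s.add(L + i - 1)
--         if i < L - 1:
--             s.add(L + i + 1)
--         s.add(i)
--         if i > 0:
--             s.add(i - 1)
--         adj[L + i] = s
--     return adj
-- ===== Notes on version B (the rewrite author's own statement) =====
-- stated objective: alternative
-- what changed: A initializes an empty set per node and then mutates the dict in three separate edge-type passes (horizontal, vertical, diagonal, two updates per edge); B never mutates: it constructs each node's complete neighbour set directly from its index, one pass over the top row and one over the bottom row.
import Mathlib
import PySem

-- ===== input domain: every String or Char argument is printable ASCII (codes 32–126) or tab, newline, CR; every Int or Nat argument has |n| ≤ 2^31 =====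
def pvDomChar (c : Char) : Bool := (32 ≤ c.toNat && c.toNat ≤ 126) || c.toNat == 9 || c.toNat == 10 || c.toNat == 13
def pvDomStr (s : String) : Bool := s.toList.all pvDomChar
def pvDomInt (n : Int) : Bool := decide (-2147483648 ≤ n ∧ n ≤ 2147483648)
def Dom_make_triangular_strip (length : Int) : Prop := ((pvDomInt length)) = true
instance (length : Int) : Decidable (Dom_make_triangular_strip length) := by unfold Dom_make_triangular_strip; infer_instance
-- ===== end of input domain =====

set_option maxHeartbeats 2000000
set_option maxRecDepth 4096

-- B replaces A's three edge-type passes (and their dict mutations) by one direct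
-- per-node construction of each neighbour set; objective: alternative decomposition.

-- ===== PORT A =====
-- the loop bodies of A's three edge loops; adj[k].add(v) is Dict.modify (every key
-- touched is already present, so the default is never consulted and this is exact)
def aStep1 (length : Int) (d : PySem.Dict Int (PySem.Set Int)) (i : Int) : PySem.Dict Int (PySem.Set Int) :=
  let d := d.modify i PySem.Set.empty (fun s => PySem.Set.add s (i + 1))
  let d := d.modify (i + 1) PySem.Set.empty (fun s => PySem.Set.add s i)
  let d := d.modify (length + i) PySem.Set.empty (fun s => PySem.Set.add s (length + i + 1))
  d.modify (length + i + 1) PySem.Set.empty (fun s => PySem.Set.add s (length + i))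

def aStep2 (length : Int) (d : PySem.Dict Int (PySem.Set Int)) (i : Int) : PySem.Dict Int (PySem.Set Int) :=
  let d := d.modify i PySem.Set.empty (fun s => PySem.Set.add s (length + i))
  d.modify (length + i) PySem.Set.empty (fun s => PySem.Set.add s i)

def aStep3 (length : Int) (d : PySem.Dict Int (PySem.Set Int)) (i : Int) : PySem.Dict Int (PySem.Set Int) :=
  let d := d.modify i PySem.Set.empty (fun s => PySem.Set.add s (length + i + 1))
  d.modify (length + i + 1) PySem.Set.empty (fun s => PySem.Set.add s i)

def make_triangular_strip (length : Int) : List (Int × List Int) :=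
  let n := 2 * length
  let adj : PySem.Dict Int (PySem.Set Int) :=
    (PySem.List.pyRange 0 n 1).foldl (fun d i => d.insert i PySem.Set.empty) PySem.Dict.empty
  let adj := (PySem.List.pyRange 0 (length - 1) 1).foldl (aStep1 length) adj
  let adj := (PySem.List.pyRange 0 length 1).foldl (aStep2 length) adj
  let adj := (PySem.List.pyRange 0 (length - 1) 1).foldl (aStep3 length) adj
  adj.items

-- ===== PORT B =====
-- the neighbour set of top-row node i, built directly
def topRow (length i : Int) : PySem.Set Int :=
  let s : PySem.Set Int := PySem.Set.empty
  let s := if 0 < i then PySem.Set.add s (i - 1) else s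
  let s := if i < length - 1 then PySem.Set.add s (i + 1) else s
  let s := PySem.Set.add s (length + i)
  if i < length - 1 then PySem.Set.add s (length + i + 1) else s

-- the neighbour set of bottom-row node length+i, built directly
def botRow (length i : Int) : PySem.Set Int :=
  let s : PySem.Set Int := PySem.Set.empty
  let s := if 0 < i then PySem.Set.add s (length + i - 1) else s
  let s := if i < length - 1 then PySem.Set.add s (length + i + 1) else s
  let s := PySem.Set.add s i
  if 0 < i then PySem.Set.add s (i - 1) else s

def make_triangular_strip_alt (length : Int) : List (Int × List Int) :=
  let adj : PySem.Dict Int (PySem.Set Int) :=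
    (PySem.List.pyRange 0 length 1).foldl (fun (d : PySem.Dict Int (PySem.Set Int)) i => d.insert i (topRow length i)) PySem.Dict.empty
  let adj := (PySem.List.pyRange 0 length 1).foldl (fun (d : PySem.Dict Int (PySem.Set Int)) i => d.insert (length + i) (botRow length i)) adj
  adj.items

-- ===== PRECONDITION & SPEC =====
def Spec_make_triangular_strip (length : Int) (out : List (Int × List Int)) : Prop := out = make_triangular_strip_alt length
instance (length : Int) (out : List (Int × List Int)) : Decidable (Spec_make_triangular_strip length out) := by unfold Spec_make_triangular_strip; infer_instance

-- ===== CLAIM (what is proved, stated in full; the proofs are below) =====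
def Claim_equal_make_triangular_strip : Prop := ∀ (length : Int), Dom_make_triangular_strip length → Spec_make_triangular_strip length (make_triangular_strip length)

-- ===== LEMMAS AND PROOFS =====

-- column index of node j (top row: j itself, bottom row: j - length)
def pvCol (L j : Int) : Int := if j < L then j else j - L

-- adjacency list of node j after the first b iterations of A's loop 1 (horizontal edges)
def pvH1 (L b j : Int) : List Int :=
  (if 1 ≤ pvCol L j ∧ pvCol L j ≤ b then [j - 1] else []) ++
  (if pvCol L j < b then [j + 1] else [])

-- … after all of loop 1 and b iterations of loop 2 (vertical edges)
def pvH2 (L b j : Int) : List Int :=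
  pvH1 L (L - 1) j ++ (if pvCol L j < b then [if j < L then L + j else j - L] else [])

-- … after loops 1, 2 and b iterations of loop 3 (diagonal edges)
def pvH3 (L b j : Int) : List Int :=
  pvH2 L L j ++
  (if j < L then (if pvCol L j < b then [L + j + 1] else [])
   else (if 1 ≤ pvCol L j ∧ pvCol L j ≤ b then [j - L - 1] else []))

theorem pv_insert_fresh {ν : Type} (l : List (Int × ν)) (k : Int) (v : ν)
    (h : ∀ p ∈ l, p.1 ≠ k) :
    PySem.Dict.insert ⟨l⟩ k v = ⟨l ++ [(k, v)]⟩ := by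
  have hc : (PySem.Dict.contains (⟨l⟩ : PySem.Dict Int ν) k) = false := by
    simp only [PySem.Dict.contains, List.any_eq_false]
    intro p hp
    simpa using h p hp
  simp [PySem.Dict.insert, hc]


theorem pv_modify_mapform (n k : Int) (f : Int → List Int) (g : List Int → List Int)
    (h0 : 0 ≤ k) (hk : k < n) :
    PySem.Dict.modify ⟨(PySem.List.pyRange 0 n 1).map (fun j => (j, f j))⟩ k PySem.Set.empty g
      = ⟨(PySem.List.pyRange 0 n 1).map (fun j => (j, if j = k then g (f j) else f j))⟩ := by
  have hmem : k ∈ PySem.List.pyRange 0 n 1 := (PySem.List.mem_pyRange_one).2 ⟨h0, hk⟩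
  have hfind : (PySem.List.pyRange 0 n 1).find? (fun j => j == k) = some k := by
    have hs : ((PySem.List.pyRange 0 n 1).find? (fun j => j == k)).isSome := by
      rw [List.find?_isSome]; exact ⟨k, hmem, by simp⟩
    obtain ⟨a, ha⟩ := Option.isSome_iff_exists.1 hs
    have := List.find?_some ha
    simp at this; subst this; exact ha
  have hget : (PySem.Dict.get? (⟨(PySem.List.pyRange 0 n 1).map (fun j => (j, f j))⟩ : PySem.Dict Int (List Int)) k) = some (f k) := by
    simp only [PySem.Dict.get?, List.find?_map]
    have : ((fun p : Int × List Int => p.1 == k) ∘ (fun j => (j, f j))) = (fun j => j == k) := rfl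
    rw [this, hfind]; rfl
  have hcont : (PySem.Dict.contains (⟨(PySem.List.pyRange 0 n 1).map (fun j => (j, f j))⟩ : PySem.Dict Int (List Int)) k) = true := by
    simp only [PySem.Dict.contains, List.any_eq_true]
    exact ⟨(k, f k), by simpa using hmem, by simp⟩
  simp only [PySem.Dict.modify, PySem.Dict.getD, hget, Option.getD_some, PySem.Dict.insert, hcont,
    if_true, List.map_map]
  congr 1
  refine List.map_congr_left (fun j hj => ?_)
  by_cases hjk : j = k
  · subst hjk; simp
  · simp [Function.comp, hjk]

theorem pv_init_items (b : Int) (hb : 0 ≤ b) :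
    ((PySem.List.pyRange 0 b 1).foldl (fun d i => d.insert i PySem.Set.empty)
        (PySem.Dict.empty : PySem.Dict Int (PySem.Set Int)))
      = ⟨(PySem.List.pyRange 0 b 1).map (fun j => (j, ([] : List Int)))⟩ := by
  induction b, hb using Int.le_induction with
  | base => simp [PySem.List.pyRange_one_eq_nil le_rfl, PySem.Dict.empty]
  | succ b hb ih =>
    rw [PySem.List.pyRange_one_succ_right hb, List.foldl_append, ih]
    simp only [List.foldl_cons, List.foldl_nil, List.map_append, List.map_cons, List.map_nil]
    rw [pv_insert_fresh _ _ _ ?fresh]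
    · rfl
    case fresh =>
      intro p hp
      simp only [List.mem_map] at hp
      obtain ⟨j, hj, rfl⟩ := hp
      have := (PySem.List.mem_pyRange_one.1 hj).2
      omega


theorem pv_loop1 (L b : Int) (h0 : 0 ≤ b) (hb : b ≤ L - 1) :
    ((PySem.List.pyRange 0 b 1).foldl (aStep1 L)
        ⟨(PySem.List.pyRange 0 (2 * L) 1).map (fun j => (j, ([] : List Int)))⟩)
      = ⟨(PySem.List.pyRange 0 (2 * L) 1).map (fun j => (j, pvH1 L b j))⟩ := by
  induction b, h0 using Int.le_induction with
  | base =>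
    rw [PySem.List.pyRange_one_eq_nil le_rfl]
    simp only [List.foldl_nil]
    congr 1
    refine List.map_congr_left (fun j hj => ?_)
    have hj' := PySem.List.mem_pyRange_one.1 hj
    simp only [pvH1, pvCol]
    split_ifs <;> first | rfl | omega
  | succ b hb' ih =>
    have hL : 2 ≤ L := by omega
    rw [PySem.List.pyRange_one_succ_right hb', List.foldl_append, ih (by omega)]
    simp only [List.foldl_cons, List.foldl_nil, aStep1]
    rw [pv_modify_mapform _ _ _ _ (by omega) (by omega)]
    rw [pv_modify_mapform _ _ _ _ (by omega) (by omega)]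
    rw [pv_modify_mapform _ _ _ _ (by omega) (by omega)]
    rw [pv_modify_mapform _ _ _ _ (by omega) (by omega)]
    congr 1
    refine List.map_congr_left (fun j hj => ?_)
    have hj' := PySem.List.mem_pyRange_one.1 hj
    clear hj ih
    by_cases h1 : j = b
    · subst h1
      rw [if_neg (by omega), if_neg (by omega), if_neg (by omega), if_pos rfl]
      simp only [pvH1, pvCol]
      split_ifs <;>
        first
          | (exfalso; omega)
          | (rw [PySem.Set.add_of_not_mem (by simp <;> omega)] <;> first | rfl | (simp <;> omega))
    · by_cases h2 : j = b + 1
      · subst h2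
        rw [if_neg (by omega), if_neg (by omega), if_pos rfl, if_neg (by omega)]
        simp only [pvH1, pvCol]
        split_ifs <;>
          first
            | (exfalso; omega)
            | (rw [PySem.Set.add_of_not_mem (by simp <;> omega)] <;> first | rfl | (simp <;> omega))
      · by_cases h3 : j = L + b
        · subst h3
          rw [if_neg (by omega), if_pos rfl, if_neg (by omega), if_neg (by omega)]
          simp only [pvH1, pvCol]
          split_ifs <;>
            first
              | (exfalso; omega)
              | (rw [PySem.Set.add_of_not_mem (by simp <;> omega)] <;> first | rfl | (simp <;> omega))
        · by_cases h4 : j = L + b + 1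
          · subst h4
            rw [if_pos rfl, if_neg (by omega), if_neg (by omega), if_neg (by omega)]
            simp only [pvH1, pvCol]
            split_ifs <;>
              first
                | (exfalso; omega)
                | (rw [PySem.Set.add_of_not_mem (by simp <;> omega)] <;> first | rfl | (simp <;> omega))
          · rw [if_neg h4, if_neg h3, if_neg h2, if_neg h1]
            simp only [pvH1, pvCol]
            split_ifs <;> first | rfl | omega


theorem pv_loop2 (L b : Int) (h0 : 0 ≤ b) (hb : b ≤ L) :
    ((PySem.List.pyRange 0 b 1).foldl (aStep2 L)
        ⟨(PySem.List.pyRange 0 (2 * L) 1).map (fun j => (j, pvH1 L (L - 1) j))⟩)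
      = ⟨(PySem.List.pyRange 0 (2 * L) 1).map (fun j => (j, pvH2 L b j))⟩ := by
  induction b, h0 using Int.le_induction with
  | base =>
    rw [PySem.List.pyRange_one_eq_nil le_rfl]
    simp only [List.foldl_nil]
    congr 1
    refine List.map_congr_left (fun j hj => ?_)
    have hj' := PySem.List.mem_pyRange_one.1 hj
    simp only [pvH2, pvCol]
    split_ifs <;> first | rfl | (exfalso; omega) | simp
  | succ b hb' ih =>
    have hL : 1 ≤ L := by omega
    rw [PySem.List.pyRange_one_succ_right hb', List.foldl_append, ih (by omega)]
    simp only [List.foldl_cons, List.foldl_nil, aStep2]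
    rw [pv_modify_mapform _ _ _ _ (by omega) (by omega)]
    rw [pv_modify_mapform _ _ _ _ (by omega) (by omega)]
    congr 1
    refine List.map_congr_left (fun j hj => ?_)
    have hj' := PySem.List.mem_pyRange_one.1 hj
    clear hj ih
    by_cases h1 : j = b
    · subst h1
      rw [if_neg (by omega), if_pos rfl]
      simp only [pvH2, pvH1, pvCol]
      split_ifs <;>
        first
          | (exfalso; omega)
          | (rw [PySem.Set.add_of_not_mem (by simp <;> omega)] <;> first | rfl | (simp <;> omega))
    · by_cases h2 : j = L + b
      · subst h2
        rw [if_pos rfl, if_neg (by omega)]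
        simp only [pvH2, pvH1, pvCol]
        split_ifs <;>
          first
            | (exfalso; omega)
            | (rw [PySem.Set.add_of_not_mem (by simp <;> omega)] <;> first | rfl | (simp <;> omega))
      · rw [if_neg h2, if_neg h1]
        simp only [pvH2, pvCol]
        split_ifs <;> first | rfl | omega


theorem pv_loop3 (L b : Int) (h0 : 0 ≤ b) (hb : b ≤ L - 1) :
    ((PySem.List.pyRange 0 b 1).foldl (aStep3 L)
        ⟨(PySem.List.pyRange 0 (2 * L) 1).map (fun j => (j, pvH2 L L j))⟩)
      = ⟨(PySem.List.pyRange 0 (2 * L) 1).map (fun j => (j, pvH3 L b j))⟩ := by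
  induction b, h0 using Int.le_induction with
  | base =>
    rw [PySem.List.pyRange_one_eq_nil le_rfl]
    simp only [List.foldl_nil]
    congr 1
    refine List.map_congr_left (fun j hj => ?_)
    have hj' := PySem.List.mem_pyRange_one.1 hj
    simp only [pvH3, pvCol]
    split_ifs <;> first | rfl | (exfalso; omega) | simp
  | succ b hb' ih =>
    have hL : 2 ≤ L := by omega
    rw [PySem.List.pyRange_one_succ_right hb', List.foldl_append, ih (by omega)]
    simp only [List.foldl_cons, List.foldl_nil, aStep3]
    rw [pv_modify_mapform _ _ _ _ (by omega) (by omega)]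
    rw [pv_modify_mapform _ _ _ _ (by omega) (by omega)]
    congr 1
    refine List.map_congr_left (fun j hj => ?_)
    have hj' := PySem.List.mem_pyRange_one.1 hj
    clear hj ih
    by_cases h1 : j = b
    · subst h1
      rw [if_neg (by omega), if_pos rfl]
      simp only [pvH3, pvH2, pvH1, pvCol]
      split_ifs <;>
        first
          | (exfalso; omega)
          | (rw [PySem.Set.add_of_not_mem (by simp <;> omega)] <;> first | rfl | (simp <;> omega))
    · by_cases h2 : j = L + b + 1
      · subst h2
        rw [if_pos rfl, if_neg (by omega)]
        simp only [pvH3, pvH2, pvH1, pvCol]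
        split_ifs <;>
          first
            | (exfalso; omega)
            | (rw [PySem.Set.add_of_not_mem (by simp <;> omega)] <;> first | rfl | (simp <;> omega))
      · rw [if_neg h2, if_neg h1]
        simp only [pvH3, pvCol]
        split_ifs <;> first | rfl | omega


theorem pv_btop (L b : Int) (h0 : 0 ≤ b) (hb : b ≤ L) :
    ((PySem.List.pyRange 0 b 1).foldl (fun (d : PySem.Dict Int (PySem.Set Int)) i => d.insert i (topRow L i))
        (PySem.Dict.empty : PySem.Dict Int (PySem.Set Int)))
      = ⟨(PySem.List.pyRange 0 b 1).map (fun i => (i, topRow L i))⟩ := by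
  induction b, h0 using Int.le_induction with
  | base => simp [PySem.List.pyRange_one_eq_nil le_rfl, PySem.Dict.empty]
  | succ b hb' ih =>
    rw [PySem.List.pyRange_one_succ_right hb', List.foldl_append, ih (by omega)]
    simp only [List.foldl_cons, List.foldl_nil, List.map_append, List.map_cons, List.map_nil]
    rw [pv_insert_fresh _ _ _ ?fresh]
    case fresh =>
      intro p hp
      simp only [List.mem_map] at hp
      obtain ⟨j, hj, rfl⟩ := hp
      have := (PySem.List.mem_pyRange_one.1 hj).2
      omega


theorem pv_bbot (L b : Int) (h0 : 0 ≤ b) (hb : b ≤ L) :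
    ((PySem.List.pyRange 0 b 1).foldl (fun (d : PySem.Dict Int (PySem.Set Int)) i => d.insert (L + i) (botRow L i))
        ⟨(PySem.List.pyRange 0 L 1).map (fun i => (i, topRow L i))⟩)
      = ⟨(PySem.List.pyRange 0 L 1).map (fun i => (i, topRow L i))
          ++ (PySem.List.pyRange 0 b 1).map (fun i => (L + i, botRow L i))⟩ := by
  induction b, h0 using Int.le_induction with
  | base => simp [PySem.List.pyRange_one_eq_nil le_rfl]
  | succ b hb' ih =>
    rw [PySem.List.pyRange_one_succ_right hb', List.foldl_append, ih (by omega)]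
    simp only [List.foldl_cons, List.foldl_nil, List.map_append, List.map_cons, List.map_nil]
    rw [pv_insert_fresh _ _ _ ?fresh]
    · simp
    case fresh =>
      intro p hp
      simp only [List.mem_append, List.mem_map] at hp
      rcases hp with ⟨j, hj, rfl⟩ | ⟨j, hj, rfl⟩ <;>
        · have := PySem.List.mem_pyRange_one.1 hj
          simp only []
          omega

theorem pv_final_top (L j : Int) (h1 : 1 ≤ L) (hj0 : 0 ≤ j) (hj : j < L) :
    pvH3 L (L - 1) j = topRow L j := by
  simp only [pvH3, pvH2, pvH1, pvCol, topRow, PySem.Set.empty]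
  split_ifs <;>
    first
      | (exfalso; omega)
      | ((simp [PySem.Set.add_eq_ite]) <;>
          ((try split_ifs) <;>
            (first
              | rfl
              | omega
              | (simp <;> omega)
              | (exfalso
                 simp only [List.mem_cons, List.mem_append, List.mem_singleton,
                   List.not_mem_nil, or_false, false_or] at *
                 omega))))


theorem pv_final_bot (L i : Int) (h1 : 1 ≤ L) (hi0 : 0 ≤ i) (hi : i < L) :
    pvH3 L (L - 1) (L + i) = botRow L i := by
  simp only [pvH3, pvH2, pvH1, pvCol, botRow, PySem.Set.empty]
  split_ifs <;>
    first
      | (exfalso; omega)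
      | ((simp [PySem.Set.add_eq_ite]) <;>
          ((try split_ifs) <;>
            (first
              | rfl
              | omega
              | (simp <;> omega)
              | (exfalso
                 simp only [List.mem_cons, List.mem_append, List.mem_singleton,
                   List.not_mem_nil, or_false, false_or] at *
                 omega))))

-- ===== VERDICT (by name: the statement is the Claim_ definition above) =====
theorem make_triangular_strip_spec : Claim_equal_make_triangular_strip := by
  intro L _
  unfold Spec_make_triangular_strip
  by_cases hL : L ≤ 0
  · simp [make_triangular_strip, make_triangular_strip_alt,
      PySem.List.pyRange_one_eq_nil (show (2 * L) ≤ 0 by omega),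
      PySem.List.pyRange_one_eq_nil (show (L - 1) ≤ 0 by omega),
      PySem.List.pyRange_one_eq_nil hL, PySem.Dict.empty]
  · push_neg at hL
    simp only [make_triangular_strip, make_triangular_strip_alt]
    rw [pv_init_items (2 * L) (by omega), pv_loop1 L (L - 1) (by omega) le_rfl,
      pv_loop2 L L (by omega) le_rfl, pv_loop3 L (L - 1) (by omega) le_rfl,
      pv_btop L L (by omega) le_rfl, pv_bbot L L (by omega) le_rfl]
    show (PySem.List.pyRange 0 (2 * L) 1).map (fun j => (j, pvH3 L (L - 1) j))
        = (PySem.List.pyRange 0 L 1).map (fun i => (i, topRow L i))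
            ++ (PySem.List.pyRange 0 L 1).map (fun i => (L + i, botRow L i))
    rw [PySem.List.pyRange_one_append 0 L (2 * L) (by omega) (by omega), List.map_append]
    congr 1
    · refine List.map_congr_left (fun j hj => ?_)
      have hj' := PySem.List.mem_pyRange_one.1 hj
      rw [pv_final_top L j (by omega) (by omega) (by omega)]
    · rw [PySem.List.pyRange_one L (2 * L), PySem.List.pyRange_one 0 L, List.map_map, List.map_map]
      have h2 : 2 * L - L = L - 0 := by ring
      rw [h2]
      refine List.map_congr_left (fun k hk => ?_)
      have hk' : (k : Int) < L := by
        have := List.mem_range.1 hk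
        omega
      simp only [Function.comp]
      rw [pv_final_bot L k (by omega) (by omega) hk']
      simp
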